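-- pv_equiv track=rewrite | github.com/ArmanAshkari/causalexplain_demo | src/util/util.py | split_range_into_k_segments
-- ===== SOURCE A (Python) =====
-- def split_range_into_k_segments(start, end, k):
--     """
--     Splits a range [a, b] into k equal segments with integer boundaries.
--
--     Parameters:
--         a (int): Start of the range.
--         b (int): End of the range.
--         k (int): Number of segments.
--
--     Returns:
--         list: A list of tuples, where each tuple represents an integer segment (start, end).
--     """
--     if k <= 0:
--         raise ValueError("Number of segments (k) must be greater than zero.")
--     if start > end:
--         raise ValueError("Start of the range (a) must be less than or equal to the end (b).")
--
--     # Compute approximate segment size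
--     segment_size = (end - start) // k
--     remainder = (end - start) % k
--
--     # Create segments
--     segments = []
--     current_start = start
--     for i in range(k):
--         current_end = current_start + segment_size
--         if remainder > 0:
--             current_end += 1
--             remainder -= 1
--         # Adjust the last segment to end exactly at b
--         if i == k - 1:
--             current_end = end
--         segments.append((current_start, current_end))
--         current_start = current_end
--
--     return segments
-- ===== SOURCE B (Python) =====
-- def split_range_into_k_segments(start, end, k):
--     if k <= 0:
--         raise ValueError("Number of segments (k) must be greater than zero.")
--     if start > end:
--         raise ValueError("Start of the range (a) must be less than or equal to the end (b).")
--     segment_size = (end - start) // k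
--     remainder = (end - start) % k
--     return [(start + i * segment_size + min(i, remainder),
--              start + (i + 1) * segment_size + min(i + 1, remainder))
--             for i in range(k)]
-- ===== Notes on version B (the rewrite author's own statement) =====
-- stated objective: simpler
-- what changed: Replaced the stateful loop threading current_start and a mutating remainder counter (with a special-cased last segment) by a stateless comprehension computing each boundary in closed form start + i*segment_size + min(i, remainder).
import Mathlib
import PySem

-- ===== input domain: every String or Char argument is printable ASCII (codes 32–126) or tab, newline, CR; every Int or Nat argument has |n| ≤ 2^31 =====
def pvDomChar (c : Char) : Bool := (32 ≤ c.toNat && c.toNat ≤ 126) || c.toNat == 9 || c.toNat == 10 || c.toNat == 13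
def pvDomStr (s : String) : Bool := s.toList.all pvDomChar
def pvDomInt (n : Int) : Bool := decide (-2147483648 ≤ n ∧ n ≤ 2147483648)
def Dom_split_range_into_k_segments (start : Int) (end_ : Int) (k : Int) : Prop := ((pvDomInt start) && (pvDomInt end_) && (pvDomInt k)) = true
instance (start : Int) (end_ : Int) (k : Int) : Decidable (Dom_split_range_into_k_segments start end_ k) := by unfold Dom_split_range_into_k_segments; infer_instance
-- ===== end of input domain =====

-- B replaces A's stateful loop (running current_start, mutating remainder, special-cased last
-- segment) by a stateless closed form start + i*segment_size + min(i, remainder); objective: simpler.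

-- ===== PORT A =====
-- A's loop body: state = (segments, current_start, remainder)
def pvAStep (end_ k seg : Int) (acc : List (Int × Int) × Int × Int) (i : Int) :
    List (Int × Int) × Int × Int :=
  let cur := acc.2.1
  let rem := acc.2.2
  let ce := cur + seg
  let p := if rem > 0 then (ce + 1, rem - 1) else (ce, rem)   -- if remainder > 0: ce += 1; rem -= 1
  let ce2 := if i = k - 1 then end_ else p.1                  -- last segment ends exactly at end
  (acc.1 ++ [(cur, ce2)], ce2, p.2)

def split_range_into_k_segments (start : Int) (end_ : Int) (k : Int) : List (Int × Int) :=
  if k ≤ 0 then []            -- Python raises ValueError here (excluded by Pre_)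
  else if start > end_ then [] -- Python raises ValueError here (excluded by Pre_)
  else
    let seg := PySem.Int.floordiv (end_ - start) k
    let r := PySem.Int.mod (end_ - start) k
    ((PySem.List.pyRange 0 k 1).foldl (pvAStep end_ k seg) ([], start, r)).1

-- ===== PORT B =====
def pvBSeg (start seg r : Int) (i : Int) : Int × Int :=
  (start + i * seg + min i r, start + (i + 1) * seg + min (i + 1) r)

def split_range_into_k_segments_alt (start : Int) (end_ : Int) (k : Int) : List (Int × Int) :=
  if k ≤ 0 then []            -- Python raises ValueError here (excluded by Pre_)
  else if start > end_ then [] -- Python raises ValueError here (excluded by Pre_)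
  else
    let seg := PySem.Int.floordiv (end_ - start) k
    let r := PySem.Int.mod (end_ - start) k
    (PySem.List.pyRange 0 k 1).map (pvBSeg start seg r)

-- ===== PRECONDITION & SPEC =====
-- Pre_ excludes exactly the two explicit 'raise ValueError' guards: k ≤ 0 or start > end.
def Pre_split_range_into_k_segments (start : Int) (end_ : Int) (k : Int) : Prop :=
  0 < k ∧ start ≤ end_
instance (start : Int) (end_ : Int) (k : Int) : Decidable (Pre_split_range_into_k_segments start end_ k) := by unfold Pre_split_range_into_k_segments; infer_instance

def pvWitness_split_range_into_k_segments : Int × Int × Int := (2, 13, 4)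

def Spec_split_range_into_k_segments (start : Int) (end_ : Int) (k : Int) (out : List (Int × Int)) : Prop := out = split_range_into_k_segments_alt start end_ k
instance (start : Int) (end_ : Int) (k : Int) (out : List (Int × Int)) : Decidable (Spec_split_range_into_k_segments start end_ k out) := by unfold Spec_split_range_into_k_segments; infer_instance

-- ===== CLAIM (what is proved, stated in full; the proofs are below) =====
def Claim_equal_split_range_into_k_segments : Prop := ∀ (start : Int) (end_ : Int) (k : Int), Dom_split_range_into_k_segments start end_ k → Pre_split_range_into_k_segments start end_ k → Spec_split_range_into_k_segments start end_ k (split_range_into_k_segments start end_ k)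

-- ===== LEMMAS AND PROOFS =====

-- Loop invariant: after m iterations A's state is (closed-form prefix, start + m*seg + min m r, r - min m r).
theorem pv_loop_inv (start end_ k seg r : Int) (hk : 0 < k) (hr0 : 0 ≤ r) (hrk : r < k)
    (hsum : seg * k + r = end_ - start) :
    ∀ (m : Nat), (m : Int) ≤ k →
      (PySem.List.pyRange 0 (m : Int) 1).foldl (pvAStep end_ k seg) ([], start, r)
        = ((PySem.List.pyRange 0 (m : Int) 1).map (pvBSeg start seg r),
           start + (m : Int) * seg + min (m : Int) r, r - min (m : Int) r) := by
  intro m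
  induction m with
  | zero =>
    intro _
    simp [min_eq_left hr0]
  | succ n ih =>
    intro hm
    have hn : (n : Int) ≤ k := by push_cast at hm ⊢; omega
    have hsplit : PySem.List.pyRange 0 ((n : Nat) + 1 : Nat) 1
        = PySem.List.pyRange 0 (n : Int) 1 ++ [(n : Int)] := by
      push_cast
      exact PySem.List.pyRange_one_succ_right (by positivity)
    rw [hsplit, List.foldl_append, List.map_append, ih hn]
    simp only [List.foldl_cons, List.foldl_nil, List.map_cons, List.map_nil]
    have hcast : ((n + 1 : Nat) : Int) = (n : Int) + 1 := by push_cast; ring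
    rw [hcast]
    by_cases hlast : (n : Int) = k - 1
    · -- last iteration: A forces current_end = end_; the closed form also gives end_
      have hn1 : (n : Int) + 1 = k := by omega
      have hminr : min ((n : Int) + 1) r = r := by rw [hn1]; exact min_eq_right (le_of_lt hrk)
      have hend : start + ((n : Int) + 1) * seg + min ((n : Int) + 1) r = end_ := by
        rw [hminr, hn1]; linear_combination hsum
      simp only [pvAStep, pvBSeg, if_pos hlast]
      by_cases hrem : r - min (n : Int) r > 0
      · rw [if_pos hrem]
        refine Prod.ext ?_ (Prod.ext ?_ ?_) <;> simp
        · exact hend.symm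
        · exact hend.symm
        · have h1 : min (n : Int) r = n := min_eq_left (by omega)
          rw [h1, hminr]; omega
      · rw [if_neg hrem]
        refine Prod.ext ?_ (Prod.ext ?_ ?_) <;> simp
        · exact hend.symm
        · exact hend.symm
        · have h1 : min (n : Int) r = r := by omega
          rw [h1, hminr]
    · simp only [pvAStep, pvBSeg, if_neg hlast]
      by_cases hrem : r - min (n : Int) r > 0
      · have h1 : min (n : Int) r = n := min_eq_left (by omega)
        have h2 : min ((n : Int) + 1) r = (n : Int) + 1 := min_eq_left (by omega)
        rw [if_pos hrem]
        refine Prod.ext ?_ (Prod.ext ?_ ?_) <;> simp [h1, h2] <;> ring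
      · have h1 : min (n : Int) r = r := by omega
        have h2 : min ((n : Int) + 1) r = r := by omega
        rw [if_neg hrem]
        refine Prod.ext ?_ (Prod.ext ?_ ?_) <;> simp [h1, h2] <;> ring

-- ===== VERDICT (by name: the statement is the Claim_ definition above) =====
theorem split_range_into_k_segments_spec : Claim_equal_split_range_into_k_segments := by
  intro start end_ k _ hpre
  obtain ⟨hk, hle⟩ := hpre
  unfold Spec_split_range_into_k_segments split_range_into_k_segments split_range_into_k_segments_alt
  rw [if_neg (by omega), if_neg (by omega), if_neg (by omega), if_neg (by omega)]
  have hktoNat : ((k.toNat : Nat) : Int) = k := Int.toNat_of_nonneg (le_of_lt hk)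
  have hinv := pv_loop_inv start end_ k (PySem.Int.floordiv (end_ - start) k)
    (PySem.Int.mod (end_ - start) k) hk
    (PySem.Int.mod_nonneg _ hk) (PySem.Int.mod_lt _ hk)
    (PySem.Int.floordiv_mul_add_mod _ _) k.toNat (by rw [hktoNat])
  rw [hktoNat] at hinv
  simp only [hinv]
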